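-- pv_equiv track=rewrite | github.com/MohamedAhmedIsmail/SignalProcessing-Package | DFTAndFFTFunction.py | ZeroCrossing
-- ===== SOURCE A (Python) =====
-- def ZeroCrossing(Signal):
--     ySignal=[]
--     mylst=[]
--     for i in range(len(Signal)):
--         mylst.append(int(Signal[i][1]))
--     for i in range(len(Signal)):
--         if i==0:
--             ySignal.append(mylst[i+1]-2*mylst[i])
--         else:
--             if i == len(Signal)-1:
--                 ySignal.append(-2*mylst[i]+mylst[i-1])
--             else:
--                 ySignal.append(mylst[i+1]-2*mylst[i]+mylst[i-1])
--     return ySignal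
-- ===== SOURCE B (Python) =====
-- def ZeroCrossing(Signal):
--     m = [int(s[1]) for s in Signal]
--     if not m:
--         return []
--     d = [m[0]] + [b - a for a, b in zip(m, m[1:])] + [-m[-1]]
--     return [b - a for a, b in zip(d, d[1:])]
-- ===== Notes on version B (the rewrite author's own statement) =====
-- stated objective: alternative
-- what changed: Replaces A's single index-branching windowed pass (first/last/middle cases) by two successive zip-based adjacent-difference passes over a padded first-difference array.
-- crash fix: On every one-element signal A raises IndexError (mylst[i+1] at i=0); B returns [-2*amplitude] there. — e.g. on ZeroCrossing([(0, 5)]): A raises IndexError, B returns [-10]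
import Mathlib
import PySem

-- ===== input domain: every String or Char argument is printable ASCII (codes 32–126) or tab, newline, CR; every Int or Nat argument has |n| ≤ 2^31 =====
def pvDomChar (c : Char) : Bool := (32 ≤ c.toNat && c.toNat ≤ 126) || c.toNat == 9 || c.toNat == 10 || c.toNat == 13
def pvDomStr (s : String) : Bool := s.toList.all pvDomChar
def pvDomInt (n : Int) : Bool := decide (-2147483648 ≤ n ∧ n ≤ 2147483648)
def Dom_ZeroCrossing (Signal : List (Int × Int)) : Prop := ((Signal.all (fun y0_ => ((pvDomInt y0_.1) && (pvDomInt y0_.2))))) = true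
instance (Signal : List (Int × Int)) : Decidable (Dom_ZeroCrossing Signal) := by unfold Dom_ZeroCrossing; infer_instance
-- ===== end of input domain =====

-- B replaces A's single index-branching windowed pass by two successive adjacent-difference
-- (zip-based) passes over a padded intermediate array; objective: alternative decomposition.

-- ===== PORT A =====
-- literal transliteration of Source A: first loop collects the amplitudes into mylst,
-- second loop branches on the index (first / last / middle element)
def ZeroCrossing (Signal : List (Int × Int)) : List Int :=
  let mylst : List Int :=
    (PySem.List.pyRange 0 (Signal.length : Int)).foldl
      (fun acc i => acc ++ [(PySem.List.pyGetD Signal i (0, 0)).2]) []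
  (PySem.List.pyRange 0 (Signal.length : Int)).foldl
    (fun ySignal i =>
      if i == 0 then
        ySignal ++ [PySem.List.pyGetD mylst (i + 1) 0 - 2 * PySem.List.pyGetD mylst i 0]
      else
        if i == (Signal.length : Int) - 1 then
          ySignal ++ [-2 * PySem.List.pyGetD mylst i 0 + PySem.List.pyGetD mylst (i - 1) 0]
        else
          ySignal ++ [PySem.List.pyGetD mylst (i + 1) 0 - 2 * PySem.List.pyGetD mylst i 0
                      + PySem.List.pyGetD mylst (i - 1) 0]) []

-- ===== PORT B =====
-- adjacent differences: [b - a for a, b in zip(xs, xs[1:])]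
def pyDiffs (xs : List Int) : List Int :=
  List.zipWith (fun a b => b - a) xs xs.tail

def ZeroCrossing_alt (Signal : List (Int × Int)) : List Int :=
  let m : List Int := Signal.map (fun s => s.2)
  if m = [] then []
  else
    let d : List Int := [m.headD 0] ++ pyDiffs m ++ [-(m.getLastD 0)]
    pyDiffs d

-- ===== PRECONDITION & SPEC =====
-- Pre_ excludes exactly the one-element signals, on which A raises IndexError (mylst[i+1] at i=0).
def Pre_ZeroCrossing (Signal : List (Int × Int)) : Prop := Signal.length ≠ 1
instance (Signal : List (Int × Int)) : Decidable (Pre_ZeroCrossing Signal) := by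
  unfold Pre_ZeroCrossing; infer_instance

def pvWitness_ZeroCrossing : (List (Int × Int)) := [(0, 3), (1, -2), (2, 5)]

-- A raises IndexError on every one-element signal; B returns [-2*amplitude] there.
def Raises_ZeroCrossing (Signal : List (Int × Int)) : Prop := Signal.length = 1
instance (Signal : List (Int × Int)) : Decidable (Raises_ZeroCrossing Signal) := by
  unfold Raises_ZeroCrossing; infer_instance
def pvRaiseWitness_ZeroCrossing : (List (Int × Int)) := [(0, 5)]
def pvRaiseWitnessOut_ZeroCrossing : List Int := [-10]

def Spec_ZeroCrossing (Signal : List (Int × Int)) (out : List Int) : Prop := out = ZeroCrossing_alt Signal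
instance (Signal : List (Int × Int)) (out : List Int) : Decidable (Spec_ZeroCrossing Signal out) := by unfold Spec_ZeroCrossing; infer_instance

-- ===== CLAIM (what is proved, stated in full; the proofs are below) =====
def Claim_equal_ZeroCrossing : Prop := ∀ (Signal : List (Int × Int)), Dom_ZeroCrossing Signal → Pre_ZeroCrossing Signal → Spec_ZeroCrossing Signal (ZeroCrossing Signal)
def Claim_raises_ZeroCrossing : Prop := (∀ (Signal : List (Int × Int)), Dom_ZeroCrossing Signal → Raises_ZeroCrossing Signal → ¬ Pre_ZeroCrossing Signal) ∧ (Dom_ZeroCrossing (pvRaiseWitness_ZeroCrossing) ∧ Raises_ZeroCrossing (pvRaiseWitness_ZeroCrossing) ∧ ZeroCrossing_alt (pvRaiseWitness_ZeroCrossing) = pvRaiseWitnessOut_ZeroCrossing)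

-- ===== LEMMAS AND PROOFS =====

theorem length_pyDiffs (xs : List Int) : (pyDiffs xs).length = xs.length - 1 := by
  simp [pyDiffs]

theorem pyDiffs_eq_map (xs : List Int) :
    pyDiffs xs = (List.range (xs.length - 1)).map (fun i => xs.getD (i + 1) 0 - xs.getD i 0) := by
  apply List.ext_getElem
  · simp [length_pyDiffs]
  · intro i h1 h2
    simp only [pyDiffs, List.getElem_zipWith, List.getElem_map, List.getElem_range,
      List.getElem_tail]
    rw [List.getD_eq_getElem, List.getD_eq_getElem]

-- first loop of A builds exactly the amplitude list
theorem mylst_eq (Signal : List (Int × Int)) :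
    (PySem.List.pyRange 0 (Signal.length : Int)).foldl
      (fun acc i => acc ++ [(PySem.List.pyGetD Signal i (0, 0)).2]) []
    = Signal.map (fun s => s.2) := by
  rw [PySem.List.foldl_append_singleton_eq_map]
  have : ∀ i : Int, (PySem.List.pyGetD Signal i (0,0)).2 = PySem.List.pyGetD (Signal.map (fun s => s.2)) i 0 := by
    intro i
    rw [show (0 : Int) = (fun (s : Int × Int) => s.2) (0,0) from rfl, PySem.List.pyGetD_map]
  simp only [this]
  have := PySem.List.map_pyGetD_pyRange_zero (Signal.map (fun s => s.2)) 0
  simp [PySem.List.len] at this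
  simpa using this

-- second loop of A, written as a map over List.range with Nat getD indexing
theorem A_eq_map (Signal : List (Int × Int)) :
    (PySem.List.pyRange 0 (Signal.length : Int)).foldl
    (fun ySignal i =>
      let mylst := Signal.map (fun s => s.2)
      if i == 0 then
        ySignal ++ [PySem.List.pyGetD mylst (i + 1) 0 - 2 * PySem.List.pyGetD mylst i 0]
      else
        if i == (Signal.length : Int) - 1 then
          ySignal ++ [-2 * PySem.List.pyGetD mylst i 0 + PySem.List.pyGetD mylst (i - 1) 0]
        else
          ySignal ++ [PySem.List.pyGetD mylst (i + 1) 0 - 2 * PySem.List.pyGetD mylst i 0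
                      + PySem.List.pyGetD mylst (i - 1) 0]) []
    = (List.range Signal.length).map (fun k =>
        let m : List Int := Signal.map (fun s => s.2)
        if k = 0 then m.getD (k + 1) 0 - 2 * m.getD k 0
        else if k = Signal.length - 1 then -2 * m.getD k 0 + m.getD (k - 1) 0
        else m.getD (k + 1) 0 - 2 * m.getD k 0 + m.getD (k - 1) 0) := by
  set m := Signal.map (fun s => s.2) with hm
  set n := Signal.length with hn
  have hbody : (fun (ySignal : List Int) (i : Int) =>
      if i == 0 then
        ySignal ++ [PySem.List.pyGetD m (i + 1) 0 - 2 * PySem.List.pyGetD m i 0]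
      else
        if i == (n : Int) - 1 then
          ySignal ++ [-2 * PySem.List.pyGetD m i 0 + PySem.List.pyGetD m (i - 1) 0]
        else
          ySignal ++ [PySem.List.pyGetD m (i + 1) 0 - 2 * PySem.List.pyGetD m i 0
                      + PySem.List.pyGetD m (i - 1) 0])
      = (fun ySignal i => ySignal ++
          [if i == 0 then PySem.List.pyGetD m (i + 1) 0 - 2 * PySem.List.pyGetD m i 0
           else if i == (n : Int) - 1 then -2 * PySem.List.pyGetD m i 0 + PySem.List.pyGetD m (i - 1) 0
           else PySem.List.pyGetD m (i + 1) 0 - 2 * PySem.List.pyGetD m i 0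
                + PySem.List.pyGetD m (i - 1) 0]) := by
    funext ySignal i; split_ifs <;> rfl
  simp only [hbody]
  rw [PySem.List.foldl_append_singleton_eq_map, PySem.List.pyRange_zero_natCast, List.map_map]
  simp only [List.nil_append]
  apply List.map_congr_left
  intro k hk
  have hkn : k < n := List.mem_range.mp hk
  simp only [Function.comp]
  by_cases hk0 : k = 0
  · subst hk0
    simp [PySem.List.pyGetD_ofNat']
  · have h1 : ((k : Int) == 0) = false := by simp; omega
    have h2 : ((k : Int) == (n : Int) - 1) = (decide (k = n - 1)) := by
      rw [Bool.eq_iff_iff]; simp only [beq_iff_eq, decide_eq_true_eq]; omega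
    have e1 : (k : Int) + 1 = ((k + 1 : Nat) : Int) := by push_cast; ring
    have e2 : (k : Int) - 1 = ((k - 1 : Nat) : Int) := by omega
    rw [h1, h2, e1, e2]
    simp only [PySem.List.pyGetD_natCast, Bool.false_eq_true, if_false]
    by_cases h3 : k = n - 1 <;> simp [h3] <;> (intro h; omega)

-- elements of B's padded first-difference array d
theorem d_getD (m : List Int) (hm : m ≠ []) (j : Nat) (hj : j ≤ m.length) :
    ([m.headD 0] ++ pyDiffs m ++ [-(m.getLastD 0)]).getD j 0 =
      (if j < m.length then m.getD j 0 else 0) - (if j = 0 then 0 else m.getD (j-1) 0) := by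
  have hlen : m.length ≠ 0 := fun h => hm (List.length_eq_zero_iff.mp h)
  have hlast : m.getLastD 0 = m.getD (m.length - 1) 0 := by
    rw [List.getLastD_eq_getLast?, List.getLast?_eq_getElem?, List.getD]
  rcases Nat.eq_zero_or_pos j with hj0 | hjpos
  · subst hj0
    cases m with
    | nil => exact absurd rfl hm
    | cons a t => simp
  · rcases Nat.lt_or_ge j m.length with hjlt | hjge
    · have hd : j - 1 < (pyDiffs m).length := by rw [length_pyDiffs]; omega
      rw [List.append_assoc, List.getD_append_right _ _ _ _ (by simp; omega),
          List.getD_append _ _ _ _ (by simpa using hd)]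
      rw [pyDiffs_eq_map]
      rw [List.getD_eq_getElem _ _ (by simp; omega)]
      simp only [List.getElem_map, List.getElem_range, List.length_singleton]
      have hj1 : j - 1 + 1 = j := by omega
      rw [hj1]
      simp [hjlt, Nat.pos_iff_ne_zero.mp hjpos]
    · have hje : j = m.length := by omega
      subst hje
      rw [List.append_assoc, List.getD_append_right _ _ _ _ (by simp; omega),
          List.getD_append_right _ _ _ _ (by rw [length_pyDiffs]; simp)]
      have hi0 : m.length - [m.headD 0].length - (pyDiffs m).length = 0 := by
        rw [length_pyDiffs]; simp
      rw [hi0, hlast]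
      simp [hlen]

-- B as the same map over List.range (needs length ≠ 1: with the padding, B also returns
--    the windowed value at the two boundaries once length ≥ 2)
theorem alt_eq_map (Signal : List (Int × Int)) (h : Signal.length ≠ 1) :
    ZeroCrossing_alt Signal
    = (List.range Signal.length).map (fun k =>
        let m : List Int := Signal.map (fun s => s.2)
        if k = 0 then m.getD (k + 1) 0 - 2 * m.getD k 0
        else if k = Signal.length - 1 then -2 * m.getD k 0 + m.getD (k - 1) 0
        else m.getD (k + 1) 0 - 2 * m.getD k 0 + m.getD (k - 1) 0) := by
  rw [ZeroCrossing_alt]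
  set m : List Int := Signal.map (fun s => s.2) with hm
  have hlm : m.length = Signal.length := by rw [hm]; simp
  by_cases hnil : m = []
  · simp only [hnil, if_true]
    have : Signal.length = 0 := by rw [← hlm, hnil]; rfl
    simp [this]
  · simp only [hnil, if_false]
    have hn2 : 2 ≤ Signal.length := by
      have : m.length ≠ 0 := fun h0 => hnil (List.length_eq_zero_iff.mp h0)
      omega
    have hdlen : ([m.headD 0] ++ pyDiffs m ++ [-(m.getLastD 0)]).length - 1 = Signal.length := by
      simp [length_pyDiffs]; omega
    rw [pyDiffs_eq_map, hdlen]
    apply List.map_congr_left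
    intro i hi
    have hiN : i < Signal.length := List.mem_range.mp hi
    rw [d_getD m hnil (i + 1) (by omega), d_getD m hnil i (by omega)]
    simp only [Nat.add_sub_cancel, hlm]
    split_ifs <;> first | contradiction | ring1 | (exfalso; omega)

-- ===== VERDICT (by name: the statement is the Claim_ definition above) =====
theorem ZeroCrossing_spec : Claim_equal_ZeroCrossing := by
  intro Signal _ hpre
  unfold Spec_ZeroCrossing
  rw [alt_eq_map Signal hpre, ZeroCrossing]
  rw [mylst_eq]
  exact A_eq_map Signal

@[simp] theorem ZeroCrossing_raises : Claim_raises_ZeroCrossing := by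
  unfold Claim_raises_ZeroCrossing
  refine ⟨fun S _ hr => ?_, by decide⟩
  simp only [Pre_ZeroCrossing, Raises_ZeroCrossing] at *
  omega
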